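-- pv_equiv track=rewrite | github.com/robdmc/django-entity-history | entity_history/models.py | get_fill_forward_indexes
-- ===== SOURCE A (Python) =====
-- from collections import deque
--
-- def get_fill_forward_indexes(values, table_values):
--     """
--     Given two lists: values, and table_values, this method will
--     return a list of indexes for each value in values.
--
--     Each index will point to the largest value in table_values that is
--     less than the corresponding value in values
--     So, for example
--     Inputs:
--         values = [0, 1, 2, 3, 4, 5]
--         table_values = [1, 3]
--     Returns:
--               [None, 0, 0, 1, 1, 1]
--     """
--     # make sure input values are not empty
--     if len(values) * len(table_values) == 0:
--         raise ValueError('neither values nor table_values can be empty')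
--
--     # make sure values are sorted
--     values = sorted(values)
--
--     # make a deque out of sorted table values
--     indexed_table_values = deque(enumerate(sorted(table_values)))
--
--     # initialize an output
--     out = []
--
--     # initialize what will be the output index unless it is overwritten
--     this_table_index = None
--
--     # pop the first index and value off of the table and set them as "next"
--     next_table_index, next_table_value = indexed_table_values.popleft()
--
--     # loop over all values
--     for value in values:
--         # find the value such that the next table_value is bigger than this table_value
--         while next_table_value <= value:
--             if indexed_table_values:
--                 next_table_index, next_table_value = indexed_table_values.popleft()
--                 this_table_index = next_table_index - 1
--             else:
--                 this_table_index = next_table_index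
--                 break
--         # save the output table index
--         out.append(this_table_index)
--
--     return out
-- ===== SOURCE B (Python) =====
-- import bisect
--
-- def get_fill_forward_indexes(values, table_values):
--     # same ValueError guard as the original
--     if len(values) * len(table_values) == 0:
--         raise ValueError('neither values nor table_values can be empty')
--     sorted_table = sorted(table_values)
--     out = []
--     for value in sorted(values):
--         j = bisect.bisect_right(sorted_table, value)
--         out.append(j - 1 if j > 0 else None)
--     return out
-- ===== Notes on version B (the rewrite author's own statement) =====
-- stated objective: simpler
-- what changed: Replaced the stateful deque two-pointer merge walk (popleft with carried this/next indices) by an independent bisect_right binary search into the sorted table for each sorted value.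
import Mathlib
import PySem

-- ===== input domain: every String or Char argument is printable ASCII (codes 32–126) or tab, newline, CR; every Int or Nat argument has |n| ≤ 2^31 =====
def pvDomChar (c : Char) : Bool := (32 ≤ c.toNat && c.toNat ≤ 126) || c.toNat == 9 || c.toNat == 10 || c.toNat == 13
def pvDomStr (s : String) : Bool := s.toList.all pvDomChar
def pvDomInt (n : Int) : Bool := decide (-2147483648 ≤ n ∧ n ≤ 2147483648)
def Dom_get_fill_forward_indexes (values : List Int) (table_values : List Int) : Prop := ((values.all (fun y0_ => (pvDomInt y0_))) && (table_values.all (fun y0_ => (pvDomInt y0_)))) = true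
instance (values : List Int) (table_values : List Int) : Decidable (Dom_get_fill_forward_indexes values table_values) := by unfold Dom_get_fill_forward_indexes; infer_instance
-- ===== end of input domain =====

-- B replaces A's stateful deque merge walk by an independent bisect_right lookup per value: simpler, same results.

-- ===== PORT A =====
-- the Python `while next_table_value <= value` loop; structural recursion on the deque
def pvAWhile (value : Int) (deq : List (Int × Int)) (nxt : Int × Int) (thisIdx : Option Int) :
    List (Int × Int) × (Int × Int) × Option Int :=
  if nxt.2 ≤ value then
    match deq with
    | p :: rest => pvAWhile value rest p (some (p.1 - 1))
    | [] => ([], nxt, some nxt.1)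
  else (deq, nxt, thisIdx)

-- the `for value in values` loop, accumulating `out`
def pvALoop (vs : List Int) (deq : List (Int × Int)) (nxt : Int × Int) (thisIdx : Option Int)
    (out : List (Option Int)) : List (Option Int) :=
  match vs with
  | [] => out
  | v :: rest =>
    let s := pvAWhile v deq nxt thisIdx
    pvALoop rest s.1 s.2.1 s.2.2 (out ++ [s.2.2])

-- A raises ValueError when either list is empty: excluded by Pre_; the port returns [] there
def get_fill_forward_indexes (values : List Int) (table_values : List Int) : List (Option Int) :=
  if values.length * table_values.length == 0 then []
  else
    match PySem.List.enumerate (PySem.List.sorted table_values id) 0 with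
    | [] => []
    | p :: deq => pvALoop (PySem.List.sorted values id) deq p none []

-- ===== PORT B =====
-- B raises the same ValueError on empty input (excluded by Pre_); the port returns [] there
def get_fill_forward_indexes_alt (values : List Int) (table_values : List Int) : List (Option Int) :=
  if values.length * table_values.length == 0 then []
  else
    let sorted_table := PySem.List.sorted table_values id
    (PySem.List.sorted values id).map (fun value =>
      let j := PySem.List.bisectRight sorted_table value
      if 0 < j then some ((j : Int) - 1) else none)

-- ===== PRECONDITION & SPEC =====
-- Pre_ excludes exactly the inputs where both A and B raise ValueError (an empty list on either side)
def Pre_get_fill_forward_indexes (values : List Int) (table_values : List Int) : Prop :=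
  values ≠ [] ∧ table_values ≠ []
instance (values : List Int) (table_values : List Int) : Decidable (Pre_get_fill_forward_indexes values table_values) := by unfold Pre_get_fill_forward_indexes; infer_instance
def pvWitness_get_fill_forward_indexes : List Int × List Int := ([0, 1, 2, 3], [1, 3])

def Spec_get_fill_forward_indexes (values : List Int) (table_values : List Int) (out : List (Option Int)) : Prop := out = get_fill_forward_indexes_alt values table_values
instance (values : List Int) (table_values : List Int) (out : List (Option Int)) : Decidable (Spec_get_fill_forward_indexes values table_values out) := by unfold Spec_get_fill_forward_indexes; infer_instance

-- ===== CLAIM (what is proved, stated in full; the proofs are below) =====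
def Claim_equal_get_fill_forward_indexes : Prop := ∀ (values : List Int) (table_values : List Int), Dom_get_fill_forward_indexes values table_values → Pre_get_fill_forward_indexes values table_values → Spec_get_fill_forward_indexes values table_values (get_fill_forward_indexes values table_values)

-- ===== LEMMAS AND PROOFS =====

-- the per-value answer B computes
def pvAns (ts : List Int) (v : Int) : Option Int :=
  if 0 < PySem.List.bisectRight ts v then some ((PySem.List.bisectRight ts v : Int) - 1) else none

theorem pv_bisect_mono (ts : List Int) (hsort : ts.Pairwise (· ≤ ·)) {u v : Int} (huv : u ≤ v) :
    PySem.List.bisectRight ts u ≤ PySem.List.bisectRight ts v := by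
  by_contra h
  push Not at h
  obtain ⟨hle, hlo, hhi⟩ := PySem.List.bisectRight_spec ts u hsort
  obtain ⟨hle', _, hhi'⟩ := PySem.List.bisectRight_spec ts v hsort
  have hlt : PySem.List.bisectRight ts v < ts.length := lt_of_lt_of_le h hle
  have h1 := hlo _ hlt h
  have h2 := hhi' _ hlt le_rfl
  omega

-- characterisation of the inner while loop, starting at deque position k
theorem pv_while_eq (ts : List Int) (hsort : ts.Pairwise (· ≤ ·)) (v : Int) :
    ∀ (d k : Nat) (hk : k < ts.length), ts.length - k = d → ∀ (tIdx : Option Int),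
    pvAWhile v ((PySem.List.enumerate ts 0).drop (k+1)) ((k : Int), ts[k]) tIdx =
      (if ts[k] ≤ v then
        (((PySem.List.enumerate ts 0).drop (min (PySem.List.bisectRight ts v) (ts.length - 1) + 1)),
          (((min (PySem.List.bisectRight ts v) (ts.length - 1) : Nat) : Int),
            ts[min (PySem.List.bisectRight ts v) (ts.length - 1)]'(by omega)),
          some ((PySem.List.bisectRight ts v : Int) - 1))
      else ((PySem.List.enumerate ts 0).drop (k+1), ((k : Int), ts[k]), tIdx)) := by
  intro d
  induction d with
  | zero => intro k hk hd tIdx; omega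
  | succ n ih =>
    intro k hk hd tIdx
    obtain ⟨hle, hlo, hhi⟩ := PySem.List.bisectRight_spec ts v hsort
    by_cases hcond : ts[k] ≤ v
    · have hkj : k < PySem.List.bisectRight ts v := by
        by_contra h
        push Not at h
        exact absurd (hhi k hk h) (not_lt.mpr hcond)
      rw [if_pos hcond]
      by_cases hk1 : k + 1 < ts.length
      · have hE1 : ((PySem.List.enumerate ts 0).drop (k+1)) =
            (((k:Int) + 1, ts[k+1]) :: (PySem.List.enumerate ts 0).drop (k+2)) := by
          rw [List.drop_eq_getElem_cons (by simpa [PySem.List.length_enumerate] using hk1)]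
          rw [PySem.List.getElem_enumerate]
          push_cast
          ring_nf
        rw [hE1, pvAWhile, if_pos hcond]
        simp only []
        have hrec := ih (k+1) hk1 (by omega) (some ((k:Int) + 1 - 1))
        have hcast : ((k:Int) + 1) = (((k+1 : Nat)) : Int) := by push_cast; ring
        rw [hcast] at hrec ⊢
        rw [hrec]
        by_cases h2 : ts[k+1] ≤ v
        · rw [if_pos h2]
        · rw [if_neg h2]
          have hj : PySem.List.bisectRight ts v = k + 1 := by
            by_contra h
            have : k + 1 < PySem.List.bisectRight ts v := by omega
            exact absurd (hlo (k+1) hk1 this) h2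
          have hmin2 : min (k + 1) (ts.length - 1) = k + 1 := by omega
          simp only [hj, hmin2]
      · have hnil : ((PySem.List.enumerate ts 0).drop (k+1)) = [] := by
          apply List.drop_eq_nil_of_le
          simp [PySem.List.length_enumerate]
          omega
        rw [hnil, pvAWhile.eq_def, if_pos hcond]
        have hj : PySem.List.bisectRight ts v = ts.length := by omega
        have hmin : min (PySem.List.bisectRight ts v) (ts.length - 1) = k := by omega
        simp only [hmin]
        simp only [hj, Prod.mk.injEq]
        refine ⟨hnil.symm, trivial, ?_⟩
        have hkl : (k : Int) = (ts.length : Int) - 1 := by omega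
        rw [hkl]
    · rw [if_neg hcond, pvAWhile.eq_def, if_neg (by simpa using hcond)]

-- characterisation of the outer for loop
theorem pv_loop_eq (ts : List Int) (hts : ts ≠ []) (hsort : ts.Pairwise (· ≤ ·)) :
    ∀ (vs : List Int), vs.Pairwise (· ≤ ·) →
    ∀ (j0 : Nat), j0 ≤ ts.length →
    (∀ v ∈ vs, j0 ≤ PySem.List.bisectRight ts v) →
    ∀ (out : List (Option Int)),
    pvALoop vs ((PySem.List.enumerate ts 0).drop (min j0 (ts.length - 1) + 1))
      (((min j0 (ts.length - 1) : Nat) : Int), ts[min j0 (ts.length - 1)]'(by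
        have hpos : 0 < ts.length := List.length_pos_iff.mpr hts
        omega))
      (if j0 = 0 then none else some ((j0 : Int) - 1)) out
    = out ++ vs.map (pvAns ts) := by
  have hpos : 0 < ts.length := List.length_pos_iff.mpr hts
  intro vs
  induction vs with
  | nil => intro _ j0 hj0 _ out; rw [pvALoop]; simp
  | cons v rest ih =>
    intro hpw j0 hj0 hlow out
    have hrest : rest.Pairwise (· ≤ ·) := hpw.of_cons
    have hvle : ∀ v' ∈ rest, v ≤ v' := fun v' hv' => List.rel_of_pairwise_cons hpw hv'
    have hk : min j0 (ts.length - 1) < ts.length := by omega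
    obtain ⟨hle, hlo, hhi⟩ := PySem.List.bisectRight_spec ts v hsort
    have hj0v : j0 ≤ PySem.List.bisectRight ts v := hlow v List.mem_cons_self
    rw [pvALoop]
    rw [pv_while_eq ts hsort v (ts.length - min j0 (ts.length - 1)) _ hk rfl]
    by_cases hcond : ts[min j0 (ts.length - 1)] ≤ v
    · simp only [if_pos hcond]
      have hjpos : 0 < PySem.List.bisectRight ts v := by
        by_contra h
        push Not at h
        exact absurd (hhi _ hk (by omega)) (not_lt.mpr hcond)
      have hmono : ∀ v' ∈ rest, PySem.List.bisectRight ts v ≤ PySem.List.bisectRight ts v' :=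
        fun v' hv' => pv_bisect_mono ts hsort (hvle v' hv')
      have hstep := ih hrest (PySem.List.bisectRight ts v) hle hmono
        (out ++ [some ((PySem.List.bisectRight ts v : Int) - 1)])
      rw [if_neg (by omega)] at hstep
      rw [hstep]
      simp [pvAns, hjpos]
    · simp only [if_neg hcond]
      have hcase : j0 ≤ ts.length - 1 := by
        by_contra h
        push Not at h
        have hjlen : PySem.List.bisectRight ts v = ts.length := by omega
        have := hlo (ts.length - 1) (by omega) (by omega)
        exact absurd (by simpa [show min j0 (ts.length - 1) = ts.length - 1 by omega] using this) hcond
      have hkj0 : min j0 (ts.length - 1) = j0 := by omega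
      have hj : PySem.List.bisectRight ts v = j0 := by
        by_contra h
        have hlt : j0 < PySem.List.bisectRight ts v := by omega
        exact absurd (by simpa [hkj0] using hlo j0 (by omega) hlt) hcond
      have hstep := ih hrest j0 hj0 (fun v' hv' => hlow v' (List.mem_cons_of_mem _ hv'))
        (out ++ [if j0 = 0 then none else some ((j0 : Int) - 1)])
      rw [hstep]
      have hans : pvAns ts v = (if j0 = 0 then none else some ((j0 : Int) - 1)) := by
        simp only [pvAns, hj]
        split_ifs <;> simp_all
      simp [hans]

-- ===== VERDICT (by name: the statement is the Claim_ definition above) =====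
theorem get_fill_forward_indexes_spec : Claim_equal_get_fill_forward_indexes := by
  intro values table_values _ hpre
  obtain ⟨hv, ht⟩ := hpre
  unfold Spec_get_fill_forward_indexes get_fill_forward_indexes get_fill_forward_indexes_alt
  have hg : (values.length * table_values.length == 0) = false := by
    simp [List.length_eq_zero_iff, hv, ht]
  rw [hg]
  simp only [Bool.false_eq_true, if_false]
  have hts : PySem.List.sorted table_values id ≠ [] := by
    intro h
    apply ht
    have hlen := PySem.List.length_sorted table_values id false
    rw [h] at hlen
    simpa [List.length_eq_zero_iff] using hlen.symm
  have hpos : 0 < (PySem.List.sorted table_values id).length := List.length_pos_iff.mpr hts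
  have hE : PySem.List.enumerate (PySem.List.sorted table_values id) 0 =
      ((0:Int), (PySem.List.sorted table_values id)[0]) ::
        (PySem.List.enumerate (PySem.List.sorted table_values id) 0).drop 1 := by
    have h0 : 0 < (PySem.List.enumerate (PySem.List.sorted table_values id) 0).length := by
      simpa [PySem.List.length_enumerate] using hpos
    have hdz := List.drop_eq_getElem_cons h0
    simpa [PySem.List.getElem_enumerate] using hdz
  rw [hE]
  show pvALoop (PySem.List.sorted values id)
      ((PySem.List.enumerate (PySem.List.sorted table_values id) 0).drop 1)
      ((0:Int), (PySem.List.sorted table_values id)[0]'hpos) none [] = _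
  have hsortT : (PySem.List.sorted table_values id).Pairwise (· ≤ ·) := by
    simpa using PySem.List.sorted_pairwise table_values id
  have hsortV : (PySem.List.sorted values id).Pairwise (· ≤ ·) := by
    simpa using PySem.List.sorted_pairwise values id
  have := pv_loop_eq (PySem.List.sorted table_values id) hts hsortT
    (PySem.List.sorted values id) hsortV 0 (by omega) (by intro v _; omega) []
  simp only [show min 0 ((PySem.List.sorted table_values id).length - 1) = 0 by omega] at this
  simp only [Nat.cast_zero, if_true, zero_add, List.nil_append] at this
  rw [this]
  simp [pvAns]
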